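-- pv_equiv track=rewrite | github.com/elifesciences/peerscout | peerscout/preprocessing/import_utils.py | _hack_double_quote_workaround_find_next_true_quote_end
-- ===== SOURCE A (Python) =====
-- def _hack_double_quote_workaround_find_next_true_quote_end(line, start):
--   quote_index = line.find('"', start)
--   if quote_index >= 0 and quote_index + 1 < len(line) and line[quote_index + 1] != ',':
--     inner_quote_index = line.find('"', quote_index + 1)
--     if inner_quote_index < 0:
--       return -1
--     return _hack_double_quote_workaround_find_next_true_quote_end(line, inner_quote_index + 1)
--   return quote_index
-- ===== SOURCE B (Python) =====
-- def _hack_double_quote_workaround_find_next_true_quote_end(line, start):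
--   n = len(line)
--   s = start if start >= 0 else max(0, start + n)
--   quote_positions = [i for i, c in enumerate(line) if c == '"' and i >= s]
--   i = 0
--   while i < len(quote_positions):
--     q = quote_positions[i]
--     if q + 1 >= n or line[q + 1] == ',':
--       return q
--     if i + 1 >= len(quote_positions):
--       return -1
--     i += 2
--   return -1
-- ===== Notes on version B (the rewrite author's own statement) =====
-- stated objective: alternative
-- what changed: B replaces A's tail recursion over repeated str.find calls by a single enumerate pass that collects all quote positions at or after the (slice-normalised) start and then walks that list two quotes at a time with an explicit index loop.
import Mathlib
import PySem

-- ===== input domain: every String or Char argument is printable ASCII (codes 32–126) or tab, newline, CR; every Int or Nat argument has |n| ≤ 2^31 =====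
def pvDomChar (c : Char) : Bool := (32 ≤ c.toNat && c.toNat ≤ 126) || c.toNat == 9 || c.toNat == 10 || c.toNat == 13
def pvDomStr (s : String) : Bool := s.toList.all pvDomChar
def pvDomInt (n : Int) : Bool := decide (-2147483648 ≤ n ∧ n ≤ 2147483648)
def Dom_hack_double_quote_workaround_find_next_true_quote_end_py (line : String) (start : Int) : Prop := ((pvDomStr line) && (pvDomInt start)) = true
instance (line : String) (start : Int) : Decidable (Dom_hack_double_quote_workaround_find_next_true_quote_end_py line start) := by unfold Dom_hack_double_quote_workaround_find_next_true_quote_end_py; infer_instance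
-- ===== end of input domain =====

-- B replaces A's tail recursion over repeated str.find calls by one enumerate pass that collects
-- all quote positions ≥ start and then steps through that list two quotes at a time (objective:
-- alternative decomposition, same linear cost).

-- ===== PORT A =====
-- fuel-bounded transliteration of A's tail recursion (fuel only makes it total; it is never exhausted:
-- each recursive call strictly increases the search start, so at most len(line)+1 calls happen)
def pvAGo (line : String) : Nat → Int → Int
  | 0, _ => -1
  | fuel + 1, start =>
    let quote_index := PySem.Str.findFrom line "\"" start none
    if 0 ≤ quote_index ∧ quote_index + 1 < PySem.Str.len line ∧
        PySem.Str.pyGet? line (quote_index + 1) ≠ some ',' then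
      let inner_quote_index := PySem.Str.findFrom line "\"" (quote_index + 1) none
      if inner_quote_index < 0 then -1
      else pvAGo line fuel (inner_quote_index + 1)
    else quote_index

def hack_double_quote_workaround_find_next_true_quote_end_py (line : String) (start : Int) : Int :=
  pvAGo line (line.toList.length + 1) start

-- ===== PORT B =====
-- the while-loop of Source B: walk the collected quote positions two at a time
def pvBGo (line : String) : List Int → Int
  | [] => -1
  | q :: rest =>
    if PySem.Str.len line ≤ q + 1 ∨ PySem.Str.pyGet? line (q + 1) = some ',' then q
    else
      match rest with
      | [] => -1
      | _ :: rest2 => pvBGo line rest2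

def hack_double_quote_workaround_find_next_true_quote_end_py_alt (line : String) (start : Int) : Int :=
  let n := PySem.Str.len line
  let s := if 0 ≤ start then start else max 0 (start + n)
  let quote_positions :=
    ((PySem.List.enumerate line.toList 0).filter
      (fun p => decide (s ≤ p.1) && (p.2 == '"'))).map (fun p => p.1)
  pvBGo line quote_positions

-- ===== PRECONDITION & SPEC =====
def Spec_hack_double_quote_workaround_find_next_true_quote_end_py (line : String) (start : Int) (out : Int) : Prop := out = hack_double_quote_workaround_find_next_true_quote_end_py_alt line start
instance (line : String) (start : Int) (out : Int) : Decidable (Spec_hack_double_quote_workaround_find_next_true_quote_end_py line start out) := by unfold Spec_hack_double_quote_workaround_find_next_true_quote_end_py; infer_instance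

-- ===== CLAIM (what is proved, stated in full; the proofs are below) =====
def Claim_equal_hack_double_quote_workaround_find_next_true_quote_end_py : Prop := ∀ (line : String) (start : Int), Dom_hack_double_quote_workaround_find_next_true_quote_end_py line start → Spec_hack_double_quote_workaround_find_next_true_quote_end_py line start (hack_double_quote_workaround_find_next_true_quote_end_py line start)

-- ===== LEMMAS AND PROOFS =====

-- all quote positions of line, in order (proof-side view of B's list before the "≥ s" filter)
def pvQl (l : List Char) : List Int :=
  ((PySem.List.enumerate l 0).filter (fun p => p.2 == '"')).map (fun p => p.1)

theorem pvEnum_mem (l : List Char) (s x : Int) :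
    x ∈ ((PySem.List.enumerate l s).filter (fun p => p.2 == '"')).map (fun p => p.1) ↔
      ∃ j : Nat, ∃ h : j < l.length, l[j] = '"' ∧ x = s + j := by
  induction l generalizing s with
  | nil => simp [PySem.List.enumerate]
  | cons c t ih =>
    rw [PySem.List.enumerate_cons]
    by_cases hc : c = '"'
    · simp only [List.filter_cons, hc, beq_self_eq_true, if_pos, List.map_cons, List.mem_cons, ih]
      constructor
      · rintro (rfl | ⟨j, hj, hq, rfl⟩)
        · exact ⟨0, by simp, by simp, by simp⟩
        · exact ⟨j + 1, by simpa using hj, by simpa using hq, by push_cast; ring⟩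
      · rintro ⟨j, hj, hq, rfl⟩
        cases j with
        | zero => left; simp
        | succ j => right; exact ⟨j, by simpa using hj, by simpa using hq, by push_cast; ring⟩
    · simp only [List.filter_cons, beq_iff_eq, hc, ih, reduceIte]
      constructor
      · rintro ⟨j, hj, hq, rfl⟩
        exact ⟨j + 1, by simpa using hj, by simpa using hq, by push_cast; ring⟩
      · rintro ⟨j, hj, hq, rfl⟩
        cases j with
        | zero => exact absurd (by simpa using hq) hc
        | succ j => exact ⟨j, by simpa using hj, by simpa using hq, by push_cast; ring⟩

theorem pvQl_mem {l : List Char} {x : Int} :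
    x ∈ pvQl l ↔ ∃ j : Nat, ∃ h : j < l.length, l[j] = '"' ∧ x = (j : Int) := by
  unfold pvQl
  rw [pvEnum_mem]
  simp

theorem pvQl_pairwise (l : List Char) : (pvQl l).Pairwise (· < ·) := by
  unfold pvQl
  rw [List.pairwise_map]
  refine List.Pairwise.sublist List.filter_sublist ?_
  have h := PySem.List.pairwise_lt_pyRange_one 0 (0 + (l.length : Int))
  rw [← PySem.List.map_fst_enumerate l 0, List.pairwise_map] at h
  exact h

theorem pvQl_length_le (l : List Char) : (pvQl l).length ≤ l.length := by
  unfold pvQl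
  calc _ = _ := List.length_map ..
    _ ≤ (PySem.List.enumerate l 0).length := List.length_filter_le ..
    _ = l.length := PySem.List.length_enumerate ..

theorem pvPrefixAt (l : List Char) (j : Nat) (hj : j < l.length) (hq : l[j] = '"') :
    ['"'] <+: l.drop j := by
  rw [List.drop_eq_getElem_cons hj, hq]
  exact ⟨l.drop (j + 1), rfl⟩

-- the single-step bridge: str.find('"', k) is the head of the quote positions ≥ k
theorem pvStep (l : List Char) (k : Nat) (hk : k ≤ l.length) :
    PySem.Chars.findFrom l ['"'] (k : Int) none =
      ((pvQl l).filter (fun q => decide ((k : Int) ≤ q))).headD (-1) := by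
  by_cases hR : PySem.Chars.findFrom l ['"'] (k : Int) none = -1
  · rw [hR]
    have hno : ¬ ['"'] <:+: l.drop k :=
      (PySem.Chars.findFrom_natCast_eq_neg_one_iff l ['"'] k hk).mp hR
    rw [List.singleton_infix_iff] at hno
    have hF : (pvQl l).filter (fun q => decide ((k : Int) ≤ q)) = [] := by
      rw [List.filter_eq_nil_iff]
      rintro x hx hkx
      obtain ⟨j, hj, hq, rfl⟩ := pvQl_mem.mp hx
      simp only [decide_eq_true_eq, Nat.cast_le] at hkx
      apply hno
      have h : (l.drop k)[j - k]'(by simp; omega) = l[j] := by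
        rw [List.getElem_drop]; congr 1; omega
      have hm : l[j] ∈ l.drop k := h ▸ List.getElem_mem _
      rwa [hq] at hm
    rw [hF]; rfl
  · obtain ⟨hkR, hpre, hmin⟩ := PySem.Chars.findFrom_natCast_spec l ['"'] k hk hR
    set R := PySem.Chars.findFrom l ['"'] (k : Int) none with hRdef
    have h0R : 0 ≤ R := le_trans (by positivity) hkR
    have hRr : R = (R.toNat : Int) := (Int.toNat_of_nonneg h0R).symm
    obtain ⟨t, ht⟩ := hpre
    have hrlen : R.toNat < l.length := by
      have := congrArg List.length ht
      simp only [List.length_drop, List.length_cons, List.length_append] at this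
      omega
    have hlr : l[R.toNat] = '"' := by
      have h1 : l[R.toNat] :: l.drop (R.toNat + 1) = '"' :: t := by
        rw [← List.drop_eq_getElem_cons hrlen, ← ht]; rfl
      exact (List.cons_eq_cons.mp h1).1
    have hFmem : R ∈ (pvQl l).filter (fun q => decide ((k : Int) ≤ q)) :=
      List.mem_filter.mpr ⟨pvQl_mem.mpr ⟨R.toNat, hrlen, hlr, hRr⟩, by simpa using hkR⟩
    have hFpair : ((pvQl l).filter (fun q => decide ((k : Int) ≤ q))).Pairwise (· < ·) :=
      List.Pairwise.sublist List.filter_sublist (pvQl_pairwise l)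
    cases hF : (pvQl l).filter (fun q => decide ((k : Int) ≤ q)) with
    | nil => rw [hF] at hFmem; cases hFmem
    | cons x tl =>
      rw [hF] at hFmem hFpair
      obtain ⟨hxQ, hxk⟩ := List.mem_filter.mp (hF ▸ (List.mem_cons_self .. : x ∈ x :: tl) : x ∈ _)
      obtain ⟨j, hj, hjq, rfl⟩ := pvQl_mem.mp hxQ
      simp only [decide_eq_true_eq] at hxk
      have hge : R ≤ (j : Int) := by
        by_contra hlt
        push Not at hlt
        have hkj : k ≤ j := by exact_mod_cast hxk
        exact hmin j hkj (by omega) (pvPrefixAt l j hj hjq)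
      have hRx : R = (j : Int) := by
        rcases List.mem_cons.mp hFmem with h | h
        · exact h
        · have := (List.pairwise_cons.mp hFpair).1 R h
          omega
      simpa using hRx

-- dropping the head quote: quotes ≥ j+1 are the tail of the quotes ≥ k
theorem pvShift {l : List Char} {k j : Nat} {rest : List Int} (hkj : k ≤ j)
    (h : (pvQl l).filter (fun q => decide ((k : Int) ≤ q)) = (j : Int) :: rest) :
    (pvQl l).filter (fun q => decide (((j + 1 : Nat) : Int) ≤ q)) = rest := by
  have hpair : ((j : Int) :: rest).Pairwise (· < ·) :=
    h ▸ List.Pairwise.sublist List.filter_sublist (pvQl_pairwise l)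
  have h1 : (pvQl l).filter (fun q => decide (((j + 1 : Nat) : Int) ≤ q)) =
      ((pvQl l).filter (fun q => decide ((k : Int) ≤ q))).filter
        (fun q => decide (((j + 1 : Nat) : Int) ≤ q)) := by
    rw [List.filter_filter]
    refine (List.filter_congr ?_).symm
    intro x _
    by_cases hx : ((j + 1 : Nat) : Int) ≤ x
    · have hkx : (k : Int) ≤ x := by push_cast at hx ⊢; omega
      rw [decide_eq_true hx, decide_eq_true hkx]
      rfl
    · rw [decide_eq_false hx]
      rfl
  rw [h1, h, List.filter_cons]
  have hjj : ¬ ((j + 1 : Nat) : Int) ≤ (j : Int) := by omega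
  simp only [hjj, decide_false, if_false, Bool.false_eq_true]
  exact List.filter_eq_self.mpr fun x hx => by
    have := (List.pairwise_cons.mp hpair).1 x hx
    simp only [decide_eq_true_eq]
    push_cast
    omega

theorem pvLenFind (line : String) (a : Int) :
    PySem.Str.findFrom line "\"" a none = PySem.Chars.findFrom line.toList ['"'] a none := by
  rw [PySem.Str.findFrom_eq]
  rfl

-- main loop invariant: A's recursion from a clamped start k equals B's walk over the quotes ≥ k
theorem pvGoEq (line : String) :
    ∀ (fuel k : Nat), k ≤ line.toList.length →
      ((pvQl line.toList).filter (fun q => decide ((k : Int) ≤ q))).length < fuel →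
      pvAGo line fuel (k : Int) =
        pvBGo line ((pvQl line.toList).filter (fun q => decide ((k : Int) ≤ q))) := by
  intro fuel
  induction fuel with
  | zero => intro k _ hlen; omega
  | succ m ih =>
    intro k hk hlen
    rw [pvAGo]
    simp only [pvLenFind]
    rw [pvStep line.toList k hk]
    cases hF : (pvQl line.toList).filter (fun q => decide ((k : Int) ≤ q)) with
    | nil =>
      rw [if_neg (by norm_num)]
      rfl
    | cons q tl =>
      rw [hF] at hlen
      simp only [List.headD_cons]
      obtain ⟨hqQ, hqk⟩ := List.mem_filter.mp (hF ▸ (List.mem_cons_self .. : q ∈ q :: tl) : q ∈ _)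
      obtain ⟨j, hj, hjq, rfl⟩ := pvQl_mem.mp hqQ
      simp only [decide_eq_true_eq] at hqk
      have hkj : k ≤ j := by exact_mod_cast hqk
      by_cases hlt : (j : Int) + 1 < PySem.Str.len line
      · by_cases hC : PySem.Str.pyGet? line ((j : Int) + 1) = some ','
        · -- exit: the character after the quote is a comma
          rw [if_neg (by rintro ⟨-, -, h⟩; exact h hC)]
          rw [pvBGo.eq_def]
          simp only []
          rw [if_pos (Or.inr hC)]
        · -- continue: look for the inner quote and recurse past it
          rw [if_pos ⟨by positivity, hlt, hC⟩]
          have hjlt : j + 1 ≤ line.toList.length := hj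
          have hrest := pvShift hkj hF
          have hcast : (j : Int) + 1 = ((j + 1 : Nat) : Int) := by push_cast; ring
          rw [pvBGo.eq_def]
          simp only []
          rw [if_neg (show ¬ (PySem.Str.len line ≤ (j : Int) + 1 ∨
              PySem.Str.pyGet? line ((j : Int) + 1) = some ',') by
            rintro (h | h)
            · exact absurd hlt (not_lt.mpr h)
            · exact hC h)]
          cases hT : tl with
          | nil =>
            rw [hT] at hrest
            rw [hcast, pvStep line.toList (j + 1) hjlt, hrest]
            rw [List.headD_nil, if_pos (by norm_num)]
          | cons r tl2 =>
            rw [hT] at hlen hrest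
            rw [hcast, pvStep line.toList (j + 1) hjlt, hrest]
            simp only [List.headD_cons]
            obtain ⟨hrQ, hrj⟩ :=
              List.mem_filter.mp (hrest ▸ (List.mem_cons_self .. : r ∈ r :: tl2) : r ∈ _)
            obtain ⟨j2, hj2, hj2q, rfl⟩ := pvQl_mem.mp hrQ
            simp only [decide_eq_true_eq] at hrj
            have hj1j2 : j + 1 ≤ j2 := by exact_mod_cast hrj
            rw [if_neg (by omega)]
            have hcast2 : (j2 : Int) + 1 = ((j2 + 1 : Nat) : Int) := by push_cast; ring
            have htl2 := pvShift hj1j2 hrest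
            rw [hcast2, ih (j2 + 1) hj2 (by rw [htl2]; simp at hlen ⊢; omega), htl2]
      · -- exit: there is no character after the found quote
        rw [if_neg (by rintro ⟨-, h, -⟩; exact hlt h)]
        rw [pvBGo.eq_def]
        simp only []
        rw [if_pos (Or.inl (not_lt.mp hlt))]

-- the start argument only enters A through str.find, which clamps it like B's normalisation
theorem pvFindGt (l sub : List Char) (a : Int) (ha : (l.length : Int) < a) :
    PySem.Chars.findFrom l sub a none = -1 := by
  simp only [PySem.Chars.findFrom]
  rw [if_neg (show ¬ a < 0 by omega), if_pos ha]

theorem pvClamp (l sub : List Char) (a : Int) :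
    PySem.Chars.findFrom l sub a none =
      PySem.Chars.findFrom l sub (if 0 ≤ a then a else max 0 (a + l.length)) none := by
  have key : (if a < 0 then if a + (l.length : Int) < 0 then 0 else a + l.length else a) =
      (if (if 0 ≤ a then a else max 0 (a + (l.length : Int))) < 0 then
        if (if 0 ≤ a then a else max 0 (a + (l.length : Int))) + l.length < 0 then 0
        else (if 0 ≤ a then a else max 0 (a + (l.length : Int))) + l.length
      else (if 0 ≤ a then a else max 0 (a + (l.length : Int)))) := by
    split_ifs <;> omega
  simp only [PySem.Chars.findFrom]
  rw [key]

theorem pvAGoCongr (line : String) (m : Nat) (a b : Int)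
    (h : PySem.Str.findFrom line "\"" a none = PySem.Str.findFrom line "\"" b none) :
    pvAGo line (m + 1) a = pvAGo line (m + 1) b := by
  rw [pvAGo, pvAGo, h]

-- B's one-pass comprehension, split into "all quote positions" then the "≥ s" filter
theorem pvCombined (l : List Char) (s : Int) :
    ((PySem.List.enumerate l 0).filter (fun p => decide (s ≤ p.1) && (p.2 == '"'))).map
        (fun p => p.1) =
      (pvQl l).filter (fun q => decide (s ≤ q)) := by
  rw [pvQl, List.filter_map, List.filter_filter]
  rfl

-- ===== VERDICT (by name: the statement is the Claim_ definition above) =====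
theorem hack_double_quote_workaround_find_next_true_quote_end_py_spec : Claim_equal_hack_double_quote_workaround_find_next_true_quote_end_py := by
  intro line start _
  unfold Spec_hack_double_quote_workaround_find_next_true_quote_end_py
  unfold hack_double_quote_workaround_find_next_true_quote_end_py
  unfold hack_double_quote_workaround_find_next_true_quote_end_py_alt
  simp only [PySem.Str.len_eq, pvCombined]
  set N := line.toList.length with hN
  set s : Int := if 0 ≤ start then start else max 0 (start + (N : Int)) with hs
  have h0s : 0 ≤ s := by rw [hs]; split_ifs <;> omega
  by_cases hsm : s ≤ (N : Int)
  · -- the clamped start lies inside the line: run the loop invariant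
    have hks : ((s.toNat : Nat) : Int) = s := Int.toNat_of_nonneg h0s
    have hfind : PySem.Str.findFrom line "\"" start none =
        PySem.Str.findFrom line "\"" ((s.toNat : Nat) : Int) none := by
      rw [pvLenFind, pvLenFind, pvClamp line.toList _ start, ← hN, ← hs, hks]
    rw [pvAGoCongr line N start _ hfind, hks.symm]
    exact pvGoEq line (N + 1) s.toNat (by omega)
      (by have h1 := List.length_filter_le (fun q => decide (((s.toNat : Nat) : Int) ≤ q)) (pvQl line.toList)
          have h2 := pvQl_length_le line.toList
          omega)
  · -- start is beyond the end of the line: both sides return -1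
    have hstart : (N : Int) < start := by
      rw [hs] at hsm; split_ifs at hsm <;> omega
    have hfind : PySem.Str.findFrom line "\"" start none = -1 := by
      rw [pvLenFind]; exact pvFindGt line.toList _ start (by rw [← hN]; omega)
    rw [pvAGo, hfind, if_neg (by norm_num)]
    have hF : (pvQl line.toList).filter (fun q => decide (s ≤ q)) = [] := by
      rw [List.filter_eq_nil_iff]
      rintro x hx hsx
      obtain ⟨j, hj, -, rfl⟩ := pvQl_mem.mp hx
      simp only [decide_eq_true_eq] at hsx
      omega
    rw [hF]
    rfl
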